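-- pv_equiv track=rewrite | github.com/phulelouch/leetcode_templates | 3.Mono_Stack.py | skyline_stack
-- ===== SOURCE A (Python) =====
-- def skyline_stack(nums):
--     n = len(nums)
--     stack = []
--     result = [-1] * n  # Initialize the result list with -1s
--     for i in range(n):
--         while stack and nums[stack[-1]] <= nums[i]:
--             stack.pop()  # pop from stack if current number is greater than stack's top
--         if stack:
--             result[i] = stack[-1]  # peek the last element of the stack
--         else:
--             result[i] = -1  # if stack is empty, result is -1
--         stack.append(i)  # push the current index onto the stack
--     return result
-- ===== SOURCE B (Python) =====
-- def skyline_stack(nums):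
--     result = []
--     for i in range(len(nums)):
--         j = i - 1
--         while j >= 0 and nums[j] <= nums[i]:
--             j = result[j]  # jump along previous-greater back-pointers
--         result.append(j)
--     return result
-- ===== Notes on version B (the rewrite author's own statement) =====
-- stated objective: alternative
-- what changed: Replaces the explicit monotonic stack with back-pointer jumps through the result array itself: for each i, start at i-1 and follow result[j] links past all elements <= nums[i].
import Mathlib
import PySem

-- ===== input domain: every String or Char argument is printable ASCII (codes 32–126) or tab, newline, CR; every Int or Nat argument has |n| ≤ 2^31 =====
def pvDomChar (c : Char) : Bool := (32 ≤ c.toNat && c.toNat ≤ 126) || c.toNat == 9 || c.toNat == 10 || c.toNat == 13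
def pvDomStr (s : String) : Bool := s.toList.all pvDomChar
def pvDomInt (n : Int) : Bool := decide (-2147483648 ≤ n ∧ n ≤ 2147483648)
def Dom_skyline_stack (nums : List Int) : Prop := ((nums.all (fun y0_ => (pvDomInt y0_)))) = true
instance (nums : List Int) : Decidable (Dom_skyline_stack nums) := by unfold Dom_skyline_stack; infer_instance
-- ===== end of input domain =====

-- B replaces A's explicit monotonic stack by back-pointer jumps through the result array itself (alternative decomposition, same O(n) cost).

-- ===== PORT A =====
-- the Python `while stack and nums[stack[-1]] <= nums[i]: stack.pop()` loop;
-- the stack is stored top-first (cons = append, head = stack[-1]).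
-- indices on the stack are always in range, so pyGetD's default 0 is never used (exact).
def pvPopA (nums : List Int) (x : Int) : List Int → List Int
  | [] => []
  | t :: rest => if PySem.List.pyGetD nums t 0 ≤ x then pvPopA nums x rest else t :: rest

def skyline_stack (nums : List Int) : List Int :=
  ((PySem.List.pyRange 0 (nums.length : Int) 1).foldl
    (fun (st : List Int × List Int) i =>
      let stack := pvPopA nums (PySem.List.pyGetD nums i 0) st.1
      (i :: stack, st.2.set i.toNat (match stack with | [] => -1 | t :: _ => t)))
    ([], List.replicate nums.length (-1))).2

-- ===== PORT B =====
-- the Python `while j >= 0 and nums[j] <= nums[i]: j = result[j]` loop;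
-- fuel (= i) is only a totality guard: each jump strictly decreases j, so i steps always suffice.
-- indices j ≥ 0 visited are always in range, so pyGetD's defaults are never used (exact).
def pvJumpB (nums result : List Int) (x : Int) : Int → Nat → Int
  | j, 0 => j
  | j, fuel+1 =>
      if 0 ≤ j ∧ PySem.List.pyGetD nums j 0 ≤ x
      then pvJumpB nums result x (PySem.List.pyGetD result j (-1)) fuel
      else j

def skyline_stack_alt (nums : List Int) : List Int :=
  (PySem.List.pyRange 0 (nums.length : Int) 1).foldl
    (fun result i =>
      result ++ [pvJumpB nums result (PySem.List.pyGetD nums i 0) (i - 1) i.toNat])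
    []

-- ===== PRECONDITION & SPEC =====
def Spec_skyline_stack (nums : List Int) (out : List Int) : Prop := out = skyline_stack_alt nums
instance (nums : List Int) (out : List Int) : Decidable (Spec_skyline_stack nums out) := by unfold Spec_skyline_stack; infer_instance

-- ===== CLAIM (what is proved, stated in full; the proofs are below) =====
def Claim_equal_skyline_stack : Prop := ∀ (nums : List Int), Dom_skyline_stack nums → Spec_skyline_stack nums (skyline_stack nums)

-- ===== LEMMAS AND PROOFS =====

-- The back-pointer chain j, res[j], res[res[j]], … down to -1; the `min … (j-1)`
-- is for termination only and is the identity whenever `pvGood res` holds.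
def pvChain (res : List Int) (j : Int) : List Int :=
  if j < 0 then [] else
    j :: pvChain res (min (PySem.List.pyGetD res j (-1)) (j - 1))
termination_by (j + 1).toNat
decreasing_by simp only [not_lt] at *; omega

-- invariant: every stored back-pointer is -1 or a smaller valid index
def pvGood (res : List Int) : Prop :=
  ∀ k : Nat, (h : k < res.length) → res[k] = -1 ∨ (0 ≤ res[k] ∧ res[k] < (k : Int))

def pvAfold (nums : List Int) (k : Nat) : List Int × List Int :=
  (PySem.List.pyRange 0 (k : Int) 1).foldl
    (fun (st : List Int × List Int) i =>
      let stack := pvPopA nums (PySem.List.pyGetD nums i 0) st.1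
      (i :: stack, st.2.set i.toNat (match stack with | [] => -1 | t :: _ => t)))
    ([], List.replicate nums.length (-1))

def pvBfold (nums : List Int) (k : Nat) : List Int :=
  (PySem.List.pyRange 0 (k : Int) 1).foldl
    (fun result i =>
      result ++ [pvJumpB nums result (PySem.List.pyGetD nums i 0) (i - 1) i.toNat])
    []

lemma pvChain_neg (res : List Int) (j : Int) (h : j < 0) : pvChain res j = [] := by
  rw [pvChain]; simp [h]

lemma pvChain_step (res : List Int) (j : Int) (hg : pvGood res) (h0 : 0 ≤ j)
    (hl : j < (res.length : Int)) :
    pvChain res j = j :: pvChain res (PySem.List.pyGetD res j (-1)) := by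
  rw [pvChain]
  have hget : PySem.List.pyGetD res j (-1) = res[j.toNat]'(by omega) :=
    PySem.List.pyGetD_eq_getElem res (-1) h0 hl
  have := hg j.toNat (by omega)
  have hmin : min (PySem.List.pyGetD res j (-1)) (j - 1) = PySem.List.pyGetD res j (-1) := by
    rw [hget]; omega
  simp [not_lt.mpr h0, hmin]

lemma pvChain_len (res : List Int) (j : Int) :
    (pvChain res j).length ≤ (j + 1).toNat := by
  fun_induction pvChain res j with
  | case1 j h => simp
  | case2 j h ih =>
      simp only [List.length_cons]
      omega

lemma pvChain_stable (res res' : List Int) (j : Int)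
    (hagree : ∀ t : Int, 0 ≤ t → t ≤ j → PySem.List.pyGetD res' t (-1) = PySem.List.pyGetD res t (-1)) :
    pvChain res' j = pvChain res j := by
  revert hagree
  fun_induction pvChain res' j with
  | case1 j h => intro _; rw [pvChain_neg _ _ h]
  | case2 j h ih =>
      intro hagree
      have hj0 : (0 : Int) ≤ j := by omega
      conv_rhs => rw [pvChain]
      rw [if_neg h]
      rw [hagree j hj0 le_rfl] at ih ⊢
      congr 1
      exact ih (fun t h0 ht => hagree t h0 (by omega))

-- bounds on the jump result
lemma pvJumpB_bounds (nums res : List Int) (x : Int) (hg : pvGood res) :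
    ∀ (fuel : Nat) (j : Int), -1 ≤ j → j < (res.length : Int) →
      -1 ≤ pvJumpB nums res x j fuel ∧ pvJumpB nums res x j fuel ≤ j := by
  intro fuel
  induction fuel with
  | zero => intro j h1 h2; simp [pvJumpB]; omega
  | succ fuel ih =>
      intro j h1 h2
      rw [pvJumpB]
      split
      · next hc =>
        have h0 : 0 ≤ j := hc.1
        have hget : PySem.List.pyGetD res j (-1) = res[j.toNat]'(by omega) :=
          PySem.List.pyGetD_eq_getElem res (-1) h0 h2
        have hgood := hg j.toNat (by omega)
        have := ih (PySem.List.pyGetD res j (-1)) (by rw [hget]; omega) (by rw [hget]; omega)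
        constructor
        · exact this.1
        · calc pvJumpB nums res x (PySem.List.pyGetD res j (-1)) fuel ≤ _ := this.2
            _ ≤ j := by rw [hget]; omega
      · omega

-- the pop loop on the chain IS the jump loop
lemma pvPop_eq_jump (nums res : List Int) (x : Int) (hg : pvGood res) :
    ∀ (fuel : Nat) (j : Int), -1 ≤ j → j < (res.length : Int) →
      (pvChain res j).length ≤ fuel →
      pvPopA nums x (pvChain res j) = pvChain res (pvJumpB nums res x j fuel)
      ∧ (match pvPopA nums x (pvChain res j) with
         | [] => (-1 : Int) | t :: _ => t) = pvJumpB nums res x j fuel := by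
  intro fuel
  induction fuel with
  | zero =>
      intro j h1 h2 hf
      have hnil : pvChain res j = [] :=
        List.eq_nil_of_length_eq_zero (Nat.le_zero.mp hf)
      have hj : j < 0 := by
        by_contra h
        rw [pvChain_step res j hg (by omega) h2] at hnil
        simp at hnil
      rw [hnil]
      simp [pvPopA, pvJumpB, pvChain_neg res j hj]
      omega
  | succ fuel ih =>
      intro j h1 h2 hf
      by_cases hj : j < 0
      · rw [pvChain_neg res j hj]
        rw [pvJumpB]
        have : ¬ (0 ≤ j ∧ PySem.List.pyGetD nums j 0 ≤ x) := by omega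
        simp only [this, if_neg, not_false_iff]
        rw [pvChain_neg res j hj]
        simp [pvPopA]
        omega
      · rw [not_lt] at hj
        have hstep := pvChain_step res j hg hj h2
        have hget : PySem.List.pyGetD res j (-1) = res[j.toNat]'(by omega) :=
          PySem.List.pyGetD_eq_getElem res (-1) hj h2
        have hgood := hg j.toNat (by omega)
        rw [hstep, pvJumpB]
        by_cases hc : PySem.List.pyGetD nums j 0 ≤ x
        · simp only [pvPopA, hc, if_pos, hj, true_and, if_pos]
          have hlen : (pvChain res (PySem.List.pyGetD res j (-1))).length ≤ fuel := by
            have := hf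
            rw [hstep] at this
            simp only [List.length_cons] at this
            omega
          exact ih (PySem.List.pyGetD res j (-1)) (by rw [hget]; omega) (by rw [hget]; omega) hlen
        · have hc' : ¬ (0 ≤ j ∧ PySem.List.pyGetD nums j 0 ≤ x) := by tauto
          have hpc : pvPopA nums x (j :: pvChain res (PySem.List.pyGetD res j (-1)))
              = j :: pvChain res (PySem.List.pyGetD res j (-1)) := by
            simp [pvPopA, hc]
          rw [if_neg hc', hpc]
          exact ⟨hstep.symm, rfl⟩

lemma pvGetD_append_left (res : List Int) (v : Int) (t : Int) (h0 : 0 ≤ t)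
    (hl : t < (res.length : Int)) :
    PySem.List.pyGetD (res ++ [v]) t (-1) = PySem.List.pyGetD res t (-1) := by
  rw [PySem.List.pyGetD_eq_getElem _ (-1) h0 (by simp; omega),
      PySem.List.pyGetD_eq_getElem res (-1) h0 hl]
  exact List.getElem_append_left (by omega)

lemma pvGetD_append_last (res : List Int) (v : Int) :
    PySem.List.pyGetD (res ++ [v]) (res.length : Int) (-1) = v := by
  rw [PySem.List.pyGetD_eq_getElem _ (-1) (by omega) (by simp)]
  simp

-- main invariant: after k steps, A's result is B's result padded with -1s and
-- A's stack is exactly the back-pointer chain from k-1 through B's result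
lemma pvMain (nums : List Int) (k : Nat) (hk : k ≤ nums.length) :
    (pvBfold nums k).length = k ∧ pvGood (pvBfold nums k) ∧
    pvAfold nums k =
      (pvChain (pvBfold nums k) ((k : Int) - 1),
       pvBfold nums k ++ List.replicate (nums.length - k) (-1)) := by
  induction k with
  | zero =>
      have : PySem.List.pyRange 0 ((0 : Nat) : Int) 1 = [] :=
        PySem.List.pyRange_one_eq_nil (by simp)
      constructor
      · simp [pvBfold]
      constructor
      · intro t ht
        rw [pvBfold, this] at ht
        simp at ht
      · simp only [pvAfold, pvBfold, this, List.foldl_nil]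
        rw [pvChain_neg [] (((0 : Nat) : Int) - 1) (by omega)]
        simp
  | succ k ih =>
      obtain ⟨hlen, hgood, hA⟩ := ih (by omega)
      set B := pvBfold nums k with hB
      have hrange : PySem.List.pyRange 0 ((k + 1 : Nat) : Int) 1
          = PySem.List.pyRange 0 (k : Int) 1 ++ [(k : Int)] := by
        push_cast
        exact PySem.List.pyRange_one_succ_right (by omega)
      set x := PySem.List.pyGetD nums (k : Int) 0 with hx
      set j' := pvJumpB nums B x ((k : Int) - 1) k with hj'
      have hBk : pvBfold nums (k + 1) = B ++ [j'] := by
        rw [pvBfold, hrange, List.foldl_append]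
        simp only [List.foldl_cons, List.foldl_nil]
        rw [← pvBfold, ← hB, ← hx, Int.toNat_natCast, ← hj']
      have hlenB : ((k : Int) - 1) < (B.length : Int) := by omega
      have hchlen : (pvChain B ((k : Int) - 1)).length ≤ k := by
        have := pvChain_len B ((k : Int) - 1)
        omega
      have hpop := pvPop_eq_jump nums B x hgood k ((k : Int) - 1) (by omega) hlenB hchlen
      have hjb := pvJumpB_bounds nums B x hgood k ((k : Int) - 1) (by omega) hlenB
      rw [← hj'] at hpop hjb
      -- bounds on j'
      have hj'lo : -1 ≤ j' := hjb.1
      have hj'hi : j' ≤ (k : Int) - 1 := hjb.2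
      -- new B state
      have hlen' : (pvBfold nums (k + 1)).length = k + 1 := by
        rw [hBk]; simp [hlen]
      have hgood' : pvGood (pvBfold nums (k + 1)) := by
        rw [hBk]
        intro t ht
        simp only [List.length_append, List.length_singleton, hlen] at ht
        by_cases htk : t < k
        · rw [List.getElem_append_left (by omega)]
          exact hgood t (by omega)
        · have : t = k := by omega
          subst this
          rw [List.getElem_append_right (by omega)]
          simp only [hlen]
          simp
          omega
      refine ⟨hlen', hgood', ?_⟩
      -- A's step
      have hAstep : pvAfold nums (k + 1) =
          ((k : Int) :: pvPopA nums x (pvAfold nums k).1,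
           (pvAfold nums k).2.set k
             (match pvPopA nums x (pvAfold nums k).1 with
              | [] => (-1 : Int) | t :: _ => t)) := by
        rw [pvAfold, hrange, List.foldl_append]
        simp only [List.foldl_cons, List.foldl_nil]
        rw [← pvAfold, ← hx, Int.toNat_natCast]
      rw [hAstep, hA]
      simp only
      rw [hpop.2, hpop.1]
      simp only [Prod.mk.injEq]
      constructor
      · -- stack part: k :: chain B j' = chain (B ++ [j']) k
        rw [hBk]
        have hch : pvChain (B ++ [j']) (((k + 1 : Nat) : Int) - 1)
            = (k : Int) :: pvChain (B ++ [j']) j' := by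
          have : (((k + 1 : Nat) : Int) - 1) = (k : Int) := by push_cast; ring
          rw [this, pvChain]
          have hk0 : ¬ ((k : Int) < 0) := by omega
          have hgetk : PySem.List.pyGetD (B ++ [j']) (k : Int) (-1) = j' := by
            have := pvGetD_append_last B j'
            rwa [hlen] at this
          rw [if_neg hk0, hgetk]
          congr 2
          omega
        rw [hch]
        congr 1
        exact (pvChain_stable B (B ++ [j']) j'
          (fun t h0 ht => pvGetD_append_left B j' t h0 (by omega))).symm
      · -- result part
        rw [hBk]
        have hset : (B ++ List.replicate (nums.length - k) (-1)).set k j'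
            = B ++ [j'] ++ List.replicate (nums.length - (k + 1)) (-1) := by
          have hrep : nums.length - k = (nums.length - (k + 1)) + 1 := by omega
          rw [hrep, List.replicate_succ, List.set_append_right _ _ (by omega)]
          simp [hlen]
        rw [← hset]

-- ===== VERDICT (by name: the statement is the Claim_ definition above) =====
theorem skyline_stack_spec : Claim_equal_skyline_stack := by
  intro nums _
  unfold Spec_skyline_stack
  have h := (pvMain nums nums.length le_rfl).2.2
  have hA : skyline_stack nums = (pvAfold nums nums.length).2 := rfl
  have hB : skyline_stack_alt nums = pvBfold nums nums.length := rfl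
  rw [hA, hB, h]
  simp
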